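-- pv_equiv track=rewrite | github.com/artzbas16/TFM-main | TFM-main/mus_env/mus.py | calcular_valor_mano_chica
-- ===== SOURCE A (Python) =====
-- def calcular_valor_mano_chica(mano):
--     """Calcula el valor de una mano para CHICA"""
--     if not mano:
--         return []
--
--     # Jerarquía para CHICA: As(1), 2, 3, 4, 5, 6, 7, Sota(10), Caballo(11), Rey(12)
--     jerarquia_chica = [1, 2, 3, 4, 5, 6, 7, 10, 11, 12]
--
--     valores = [carta[0] for carta in mano]
--     conteo = {}
--     for valor in valores:
--         conteo[valor] = conteo.get(valor, 0) + 1
--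
--     # Crear lista de valores ordenados por jerarquía
--     resultado = []
--     for valor in jerarquia_chica:
--         if valor in conteo:
--             resultado.extend([valor] * conteo[valor])
--
--     return resultado
-- ===== SOURCE B (Python) =====
-- def calcular_valor_mano_chica(mano):
--     """Calcula el valor de una mano para CHICA"""
--     jerarquia_chica = [1, 2, 3, 4, 5, 6, 7, 10, 11, 12]
--     rango = {v: i for i, v in enumerate(jerarquia_chica)}
--     valores = [carta[0] for carta in mano]
--     return sorted((v for v in valores if v in rango), key=lambda v: rango[v])
-- ===== Notes on version B (the rewrite author's own statement) =====
-- stated objective: idiomatic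
-- what changed: A counts occurrences into a dict and then walks the fixed chica hierarchy emitting each value count-many times; B filters the raw values to those in the hierarchy and returns them through one stable sorted() keyed on a value-to-rank lookup built from enumerate.
import Mathlib
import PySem

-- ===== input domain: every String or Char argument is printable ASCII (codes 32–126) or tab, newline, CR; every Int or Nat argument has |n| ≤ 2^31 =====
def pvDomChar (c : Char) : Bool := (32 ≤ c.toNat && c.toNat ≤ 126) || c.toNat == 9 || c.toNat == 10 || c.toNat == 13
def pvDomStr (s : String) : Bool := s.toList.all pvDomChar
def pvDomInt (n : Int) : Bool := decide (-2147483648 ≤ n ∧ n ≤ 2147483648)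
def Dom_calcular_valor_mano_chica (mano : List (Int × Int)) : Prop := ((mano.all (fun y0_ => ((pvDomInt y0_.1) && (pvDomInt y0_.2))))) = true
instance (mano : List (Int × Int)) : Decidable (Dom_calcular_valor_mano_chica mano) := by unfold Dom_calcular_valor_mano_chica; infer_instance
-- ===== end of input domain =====

-- B replaces A's count-then-walk-the-hierarchy loop by a single stable sort of the
-- (hierarchy-filtered) card values keyed on their rank in the fixed hierarchy (objective: idiomatic).

-- ===== PORT A =====
def calcular_valor_mano_chica (mano : List (Int × Int)) : List Int :=
  if mano = [] then []
  else
    let jerarquia_chica : List Int := [1, 2, 3, 4, 5, 6, 7, 10, 11, 12]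
    let valores := mano.map (fun carta => carta.1)
    let conteo : PySem.Dict Int Int :=
      valores.foldl (fun d valor => d.insert valor (d.getD valor 0 + 1)) PySem.Dict.empty
    -- '[valor] * conteo[valor]': the count is a positive int here, so '.toNat' is exact
    jerarquia_chica.foldl (fun resultado valor =>
      if conteo.contains valor then
        resultado ++ List.replicate (conteo.getD valor 0).toNat valor
      else resultado) []

-- ===== PORT B =====
-- rango = {v: i for i, v in enumerate(jerarquia_chica)}
def rango_chica : PySem.Dict Int Int :=
  (PySem.List.enumerate [1, 2, 3, 4, 5, 6, 7, 10, 11, 12]).foldl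
    (fun d p => d.insert p.2 p.1) PySem.Dict.empty

def calcular_valor_mano_chica_alt (mano : List (Int × Int)) : List Int :=
  let valores := mano.map (fun carta => carta.1)
  -- 'rango[v]' ported as getD v 0: exact, since the filter keeps only keys present in rango
  PySem.List.sorted (valores.filter (fun v => rango_chica.contains v))
    (fun v => rango_chica.getD v 0) false

-- ===== PRECONDITION & SPEC =====
def Spec_calcular_valor_mano_chica (mano : List (Int × Int)) (out : List Int) : Prop := out = calcular_valor_mano_chica_alt mano
instance (mano : List (Int × Int)) (out : List Int) : Decidable (Spec_calcular_valor_mano_chica mano out) := by unfold Spec_calcular_valor_mano_chica; infer_instance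

-- ===== CLAIM (what is proved, stated in full; the proofs are below) =====
def Claim_equal_calcular_valor_mano_chica : Prop := ∀ (mano : List (Int × Int)), Dom_calcular_valor_mano_chica mano → Spec_calcular_valor_mano_chica mano (calcular_valor_mano_chica mano)

-- ===== LEMMAS AND PROOFS =====

-- insertBy puts x in front when it goes before everything
theorem insertBy_front {α : Type} (before : α → α → Bool) (x : α) (r : List α)
    (h : ∀ y ∈ r, before x y = true) : PySem.List.insertBy before x r = x :: r := by
  cases r with
  | nil => rfl
  | cons y ys => simp [PySem.List.insertBy, h y (List.mem_cons_self)]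

-- insertBy passes over a prefix it goes after
theorem insertBy_skip {α : Type} (before : α → α → Bool) (x : α) (l r : List α)
    (h : ∀ y ∈ l, before x y = false) :
    PySem.List.insertBy before x (l ++ r) = l ++ PySem.List.insertBy before x r := by
  induction l with
  | nil => rfl
  | cons y ys ih =>
    simp only [List.cons_append, PySem.List.insertBy, h y (List.mem_cons_self)]
    simp only [Bool.false_eq_true, if_false, List.cons.injEq, true_and]
    exact ih (fun z hz => h z (List.mem_cons_of_mem _ hz))

-- stable insertion into the bucket decomposition: x joins the END of its key's bucket
theorem insert_buckets (key : Int → Int) (ks : List Int) (hks : ks.Pairwise (· < ·))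
    (ys : List Int) (x : Int) (hx : key x ∈ ks) :
    PySem.List.insertBy (fun a b => decide (key a < key b)) x
        (ks.flatMap fun k => ys.filter (fun y => key y == k))
      = ks.flatMap fun k => (ys ++ [x]).filter (fun y => key y == k) := by
  induction ks generalizing ys with
  | nil => simp at hx
  | cons k ks ih =>
    rcases List.pairwise_cons.mp hks with ⟨hk, hks'⟩
    simp only [List.flatMap_cons, List.filter_append]
    by_cases hxk : key x = k
    · have hskip : ∀ y ∈ ys.filter (fun y => key y == k),
          (fun a b => decide (key a < key b)) x y = false := by
        intro y hy
        have := (List.mem_filter.mp hy).2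
        simp at this ⊢
        omega
      have hfront : ∀ y ∈ ks.flatMap fun k' => ys.filter (fun y => key y == k'),
          (fun a b => decide (key a < key b)) x y = true := by
        intro y hy
        rcases List.mem_flatMap.mp hy with ⟨k', hk', hyf⟩
        have := (List.mem_filter.mp hyf).2
        have hlt := hk k' hk'
        simp at this ⊢
        omega
      rw [insertBy_skip _ _ _ _ hskip, insertBy_front _ _ _ hfront]
      have hxbkt : List.filter (fun y => key y == k) [x] = [x] := by simp [hxk]
      have htail : (ks.flatMap fun k' => ys.filter (fun y => key y == k') ++ List.filter (fun y => key y == k') [x])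
          = ks.flatMap fun k' => ys.filter (fun y => key y == k') := by
        apply List.flatMap_congr
        intro k' hk'
        have hlt := hk k' hk'
        have : List.filter (fun y => key y == k') [x] = [] := by
          simp
          omega
        simp [this]
      rw [htail, hxbkt]
      simp
    · have hx' : key x ∈ ks := by
        rcases List.mem_cons.mp hx with h | h
        · exact absurd h hxk
        · exact h
      have hklt : k < key x := hk _ hx'
      have hskip : ∀ y ∈ ys.filter (fun y => key y == k),
          (fun a b => decide (key a < key b)) x y = false := by
        intro y hy
        have := (List.mem_filter.mp hy).2
        simp at this ⊢
        omega
      have hxbkt : List.filter (fun y => key y == k) [x] = [] := by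
        simp
        omega
      rw [insertBy_skip _ _ _ _ hskip, ih hks' ys hx', hxbkt]
      simp

theorem foldl_insert_buckets (key : Int → Int) (ks : List Int) (hks : ks.Pairwise (· < ·)) :
    ∀ (xs ys : List Int), (∀ x ∈ xs, key x ∈ ks) →
    xs.foldl (fun acc x => PySem.List.insertBy (fun a b => decide (key a < key b)) x acc)
        (ks.flatMap fun k => ys.filter (fun y => key y == k))
      = ks.flatMap fun k => (ys ++ xs).filter (fun y => key y == k) := by
  intro xs
  induction xs with
  | nil => intro ys _; simp
  | cons x xs ih =>
    intro ys hmem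
    simp only [List.foldl_cons]
    rw [insert_buckets key ks hks ys x (hmem x (List.mem_cons_self))]
    have := ih (ys ++ [x]) (fun z hz => hmem z (List.mem_cons_of_mem _ hz))
    rw [this]
    simp

-- characterisation of the stable sort: concatenation of the key-buckets in key order
theorem sorted_buckets (key : Int → Int) (ks : List Int) (hks : ks.Pairwise (· < ·))
    (xs : List Int) (hxs : ∀ x ∈ xs, key x ∈ ks) :
    PySem.List.sorted xs key false = ks.flatMap fun k => xs.filter (fun y => key y == k) := by
  rw [PySem.List.sorted_eq_foldl_insertBy]
  have h0 : (ks.flatMap fun k => ([] : List Int).filter (fun y => key y == k)) = [] := by simp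
  have := foldl_insert_buckets key ks hks xs [] hxs
  rw [h0] at this
  simpa using this

theorem rango_chica_eq : rango_chica = PySem.Dict.mk [(1,0),(2,1),(3,2),(4,3),(5,4),(6,5),(7,6),(10,7),(11,8),(12,9)] := by decide

theorem mem_of_contains_rango (y : Int) (h : rango_chica.contains y = true) :
    y ∈ ([1,2,3,4,5,6,7,10,11,12] : List Int) := by
  rw [rango_chica_eq, PySem.Dict.contains_mk] at h
  simp at h
  simp
  omega

-- pointwise: "has rank i and is in the hierarchy" is exactly "equals the i-th hierarchy value"
theorem pred_eq (v i : Int)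
    (hvi : (v, i) ∈ ([(1,0),(2,1),(3,2),(4,3),(5,4),(6,5),(7,6),(10,7),(11,8),(12,9)] : List (Int × Int)))
    (y : Int) :
    ((rango_chica.getD y 0 == i) && rango_chica.contains y) = (y == v) := by
  by_cases hy : rango_chica.contains y = true
  · have hm := mem_of_contains_rango y hy
    fin_cases hvi <;> fin_cases hm <;> decide
  · have hyf : rango_chica.contains y = false := by simpa using hy
    have hvc : rango_chica.contains v = true := by fin_cases hvi <;> decide
    have hne : (y == v) = false := by
      simp only [beq_eq_false_iff_ne, ne_eq]
      intro h
      rw [h, hvc] at hyf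
      exact absurd hyf (by simp)
    simp [hyf, hne]

-- B's rank buckets are A's value buckets
theorem buckets_main (valores : List Int) :
    (([0,1,2,3,4,5,6,7,8,9] : List Int).flatMap fun i =>
        (valores.filter (fun v => rango_chica.contains v)).filter (fun y => rango_chica.getD y 0 == i))
      = ([1,2,3,4,5,6,7,10,11,12] : List Int).flatMap fun v => valores.filter (fun y => y == v) := by
  have hb : ∀ (v i : Int),
      (v, i) ∈ ([(1,0),(2,1),(3,2),(4,3),(5,4),(6,5),(7,6),(10,7),(11,8),(12,9)] : List (Int × Int)) →
      (valores.filter (fun v => rango_chica.contains v)).filter (fun y => rango_chica.getD y 0 == i)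
        = valores.filter (fun y => y == v) := by
    intro v i hvi
    rw [List.filter_filter]
    exact List.filter_congr (fun y _ => pred_eq v i hvi y)
  simp only [List.flatMap_cons, List.flatMap_nil, List.append_nil]
  rw [hb 1 0 (by decide), hb 2 1 (by decide), hb 3 2 (by decide), hb 4 3 (by decide),
      hb 5 4 (by decide), hb 6 5 (by decide), hb 7 6 (by decide), hb 10 7 (by decide),
      hb 11 8 (by decide), hb 12 9 (by decide)]

-- A is the concatenation of the value buckets in hierarchy order
theorem A_char (mano : List (Int × Int)) :
    calcular_valor_mano_chica mano
      = ([1,2,3,4,5,6,7,10,11,12] : List Int).flatMap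
          (fun v => (mano.map (fun carta => carta.1)).filter (fun y => y == v)) := by
  unfold calcular_valor_mano_chica
  by_cases h : mano = []
  · subst h; simp
  · simp only [if_neg h]
    rw [PySem.Dict.foldl_insert_getD_add_one_eq_counter]
    rw [PySem.List.foldl_congr_mem _ _
        (fun res v => res ++ (mano.map (fun carta => carta.1)).filter (fun y => y == v)) []
        ?_]
    · rw [PySem.List.foldl_append_eq_flatMap]; simp
    · intro acc v _
      by_cases hc : (PySem.Dict.counter (mano.map (fun carta => carta.1))).contains v = true
      · rw [if_pos hc, PySem.Dict.getD_counter]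
        simp [List.filter_beq]
      · rw [if_neg hc]
        have hnc : v ∉ mano.map (fun carta => carta.1) := by
          intro hmem
          rw [PySem.Dict.contains_counter] at hc
          exact hc (List.contains_iff_mem.mpr hmem)
        simp [List.filter_beq, List.count_eq_zero.mpr hnc]

theorem main_eq (mano : List (Int × Int)) :
    calcular_valor_mano_chica mano = calcular_valor_mano_chica_alt mano := by
  unfold calcular_valor_mano_chica_alt
  rw [sorted_buckets (fun v => rango_chica.getD v 0) ([0,1,2,3,4,5,6,7,8,9] : List Int)
      (by decide) _ ?_, buckets_main, A_char]
  intro x hx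
  have hc := (List.mem_filter.mp hx).2
  have hm := mem_of_contains_rango x hc
  fin_cases hm <;> decide

-- ===== VERDICT (by name: the statement is the Claim_ definition above) =====
theorem calcular_valor_mano_chica_spec : Claim_equal_calcular_valor_mano_chica := by
  intro mano _
  unfold Spec_calcular_valor_mano_chica
  exact main_eq mano
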